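-- pv_equiv track=rewrite | github.com/jkugelman/crossword | wordlists/seven-up.py | turn_tail
-- ===== SOURCE A (Python) =====
-- def turn_tail(words, n):
--     # Filter out words shorter than n characters
--     words = [w for w in words if len(w) >= n]
--
--     # Dictionaries for grouping by suffix (forward and reverse)
--     forward_groups = {}
--     reverse_groups = {}
--
--     for w in words:
--         suffix = w[-n:]              # last n characters
--         rev_suffix = suffix[::-1]    # reversed suffix
--
--         forward_groups.setdefault(suffix, []).append(w)
--         reverse_groups.setdefault(rev_suffix, []).append(w)
--
--     result = {}
--
--     for suffix, key_words in forward_groups.items():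
--         if suffix not in reverse_groups:
--             continue
--         value_words = reverse_groups[suffix]
--
--         # Avoid double counting.
--         if suffix > suffix[::-1]:
--             continue
--
--         # Avoid trivial dupes.
--         if len(key_words) == 1 and key_words == value_words:
--             continue
--
--         result[tuple(key_words)] = tuple(value_words)
--
--     return result
-- ===== SOURCE B (Python) =====
-- def turn_tail(words, n):
--     # No grouping dicts: process each suffix at its first occurrence and recompute its
--     # forward and reverse groups by scanning the filtered word list directly.
--     ws = [w for w in words if len(w) >= n]
--     seen = []
--     result = {}
--     for w in ws:
--         suffix = w[-n:]
--         if suffix in seen: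
--             continue
--         seen.append(suffix)
--         rev = suffix[::-1]
--         value_words = [v for v in ws if v[-n:] == rev]
--         if not value_words:
--             continue
--         if suffix > rev:
--             continue
--         key_words = [v for v in ws if v[-n:] == suffix]
--         if len(key_words) == 1 and key_words == value_words:
--             continue
--         result[tuple(key_words)] = tuple(value_words)
--     return result
-- ===== Notes on version B (the rewrite author's own statement) =====
-- stated objective: alternative
-- what changed: B drops both grouping dictionaries entirely: it walks the filtered words, processes each suffix only at its first occurrence (a seen list), and recomputes the forward and reverse groups for that suffix by direct list scans, trading A's one-pass hash grouping for dict-free rescans.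
import Mathlib
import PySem

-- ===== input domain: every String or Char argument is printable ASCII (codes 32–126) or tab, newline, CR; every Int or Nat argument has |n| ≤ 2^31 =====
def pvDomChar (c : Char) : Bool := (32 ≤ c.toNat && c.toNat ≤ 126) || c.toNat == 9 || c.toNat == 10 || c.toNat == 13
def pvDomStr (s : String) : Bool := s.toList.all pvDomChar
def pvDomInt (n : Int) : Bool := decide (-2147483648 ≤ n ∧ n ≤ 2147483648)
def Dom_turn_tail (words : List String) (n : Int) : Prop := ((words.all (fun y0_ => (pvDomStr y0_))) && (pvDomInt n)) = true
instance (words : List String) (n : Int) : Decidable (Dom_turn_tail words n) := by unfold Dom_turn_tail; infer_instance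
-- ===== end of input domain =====

-- B drops both grouping dicts: each suffix is processed at its first occurrence (a seen list)
-- and its groups recomputed by direct scans (alternative decomposition, not faster); A mutates nothing.

-- B drops both grouping dicts and recomputes each first-occurrence suffix's groups by direct
-- list scans (alternative decomposition, not faster); return value only — A mutates nothing.

-- ===== PORT A =====
-- suffix keys are List Char (Python str keys); s[::-1] = (slice? s none none (-1)).getD,
-- exact by PySem.List.slice?_none_none_neg_one
def turn_tail (words : List String) (n : Int) : List (List String × List String) :=
  -- words = [w for w in words if len(w) >= n]
  let ws := words.filter (fun w => decide (n ≤ (PySem.Str.len w : Int)))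
  -- the two setdefault/append loops over one pair of dicts
  let fr : PySem.Dict (List Char) (List String) × PySem.Dict (List Char) (List String) :=
    ws.foldl (fun p w =>
      let suffix := PySem.List.slice w.toList (some (-n)) none
      let rev_suffix := (PySem.List.slice? suffix none none (-1)).getD []
      (p.1.modify suffix [] (· ++ [w]), p.2.modify rev_suffix [] (· ++ [w])))
      (PySem.Dict.empty, PySem.Dict.empty)
  let result : PySem.Dict (List String) (List String) :=
    fr.1.items.foldl (fun r kv =>
      let suffix := kv.1
      let key_words := kv.2
      if fr.2.contains suffix = false then r          -- if suffix not in reverse_groups: continue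
      else
        let value_words := fr.2.getD suffix []        -- reverse_groups[suffix] (key present)
        if decide ((PySem.List.slice? suffix none none (-1)).getD [] < suffix) then r  -- suffix > suffix[::-1]
        else if key_words.length == 1 && key_words == value_words then r
        else r.insert key_words value_words)
      PySem.Dict.empty
  result.items

-- ===== PORT B =====
def turn_tail_alt (words : List String) (n : Int) : List (List String × List String) :=
  let ws := words.filter (fun w => decide (n ≤ (PySem.Str.len w : Int)))
  -- for w in ws: … with state (seen, result)
  let sr : List (List Char) × PySem.Dict (List String) (List String) :=
    ws.foldl (fun p w =>
      let suffix := PySem.List.slice w.toList (some (-n)) none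
      if suffix ∈ p.1 then p                          -- if suffix in seen: continue
      else
        let seen := p.1 ++ [suffix]                   -- seen.append(suffix)
        let rev := (PySem.List.slice? suffix none none (-1)).getD []
        let value_words := ws.filter (fun v => PySem.List.slice v.toList (some (-n)) none == rev)
        if value_words.isEmpty then (seen, p.2)       -- if not value_words: continue
        else if decide (rev < suffix) then (seen, p.2)  -- if suffix > rev: continue
        else
          let key_words := ws.filter (fun v => PySem.List.slice v.toList (some (-n)) none == suffix)
          if key_words.length == 1 && key_words == value_words then (seen, p.2)
          else (seen, p.2.insert key_words value_words))
      ([], PySem.Dict.empty)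
  sr.2.items

-- ===== PRECONDITION & SPEC =====
def Spec_turn_tail (words : List String) (n : Int) (out : List (List String × List String)) : Prop := out = turn_tail_alt words n
instance (words : List String) (n : Int) (out : List (List String × List String)) : Decidable (Spec_turn_tail words n out) := by unfold Spec_turn_tail; infer_instance

-- ===== CLAIM (what is proved, stated in full; the proofs are below) =====
def Claim_equal_turn_tail : Prop := ∀ (words : List String) (n : Int), Dom_turn_tail words n → Spec_turn_tail words n (turn_tail words n)

-- ===== LEMMAS AND PROOFS =====

theorem discard_filter (L : List (List Char)) (x : List Char) (p : List Char → Bool)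
    (h : p x = false) : (PySem.Set.discard L x).filter p = L.filter p := by
  simp only [PySem.Set.discard, List.filter_filter]
  apply List.filter_congr
  intro y _
  by_cases hy : y = x
  · subst hy; simp [h]
  · simp [hy]

theorem discard_filter_notmem (L : List (List Char)) (x : List Char) (seen : List (List Char)) :
    (PySem.Set.discard L x).filter (fun y => decide (y ∉ seen))
      = L.filter (fun y => decide (y ∉ seen ++ [x])) := by
  simp only [PySem.Set.discard, List.filter_filter]
  apply List.filter_congr
  intro y _
  by_cases h1 : y = x
  · subst h1; simp
  · by_cases h2 : y ∈ seen <;> simp [h1, h2]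

theorem dedup_fold {σ : Type} (g : σ → List Char → σ) :
    ∀ (l seen : List (List Char)) (r : σ),
      (l.foldl (fun (p : List (List Char) × σ) s =>
          if s ∈ p.1 then p else (p.1 ++ [s], g p.2 s)) (seen, r)).2
      = ((PySem.Set.ofList l).filter (fun s => decide (s ∉ seen))).foldl g r := by
  intro l
  induction l with
  | nil => intro seen r; simp [PySem.Set.ofList_nil]
  | cons s t ih =>
    intro seen r
    rw [List.foldl_cons, PySem.Set.ofList_cons]
    by_cases hs : s ∈ seen
    · rw [if_pos hs, ih, List.filter_cons]
      simp only [hs, not_true_eq_false, decide_false, Bool.false_eq_true, if_false]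
      rw [discard_filter _ _ _ (by simp [hs])]
    · rw [if_neg hs, ih, List.filter_cons]
      simp only [hs, not_false_eq_true, decide_true, if_true, List.foldl_cons]
      rw [discard_filter_notmem]

theorem getD_group (k : String → List Char) (ws : List String) (s : List Char) :
    (ws.foldl (fun (d : PySem.Dict (List Char) (List String)) w => d.modify (k w) [] (· ++ [w]))
        PySem.Dict.empty).getD s []
      = ws.filter (fun w => k w == s) := by
  have h : ws.foldl (fun (d : PySem.Dict (List Char) (List String)) w => d.modify (k w) [] (· ++ [w]))
        PySem.Dict.empty
      = (ws.map (fun w => (k w, w))).foldl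
          (fun (d : PySem.Dict (List Char) (List String)) p => d.modify p.1 [] (fun x => x ++ [p.2])) PySem.Dict.empty := by
    rw [List.foldl_map]
  rw [h, PySem.Dict.getD_foldl_modify_append, List.filter_map, List.map_map]
  simp only [Function.comp_def, PySem.Dict.getD_empty, List.nil_append, List.map_id']

theorem keys_group (k : String → List Char) (ws : List String) :
    (ws.foldl (fun (d : PySem.Dict (List Char) (List String)) w => d.modify (k w) [] (· ++ [w]))
        PySem.Dict.empty).keys = PySem.Set.ofList (ws.map k) := by
  rw [PySem.Dict.keys_foldl_modify_key ws k [] (fun _ w => (· ++ [w])), PySem.Dict.keys_empty,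
    PySem.Set.update_nil_left]

theorem contains_group (k : String → List Char) (ws : List String) (s : List Char) :
    (ws.foldl (fun (d : PySem.Dict (List Char) (List String)) w => d.modify (k w) [] (· ++ [w]))
        PySem.Dict.empty).contains s = decide (s ∈ ws.map k) := by
  rw [PySem.Dict.contains_eq_decide_mem_keys, keys_group]
  simp [PySem.Set.mem_ofList]

theorem nodup_keys_group (k : String → List Char) (ws : List String) :
    (ws.foldl (fun (d : PySem.Dict (List Char) (List String)) w => d.modify (k w) [] (· ++ [w]))
        PySem.Dict.empty).keys.Nodup := by
  exact PySem.Dict.nodup_keys_foldl_modify_key ws k [] (fun _ w => (· ++ [w])) _ (by simp [PySem.Dict.keys_empty])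
theorem rev_filter (suf : String → List Char) (ws : List String) (s : List Char) :
    ws.filter (fun w => (suf w).reverse == s) = ws.filter (fun v => suf v == s.reverse) := by
  apply List.filter_congr
  intro w _
  rw [Bool.eq_iff_iff, beq_iff_eq, beq_iff_eq, List.reverse_eq_iff]

theorem bridge (suf : String → List Char) (ws : List String) :
    ((((ws.foldl (fun (d : PySem.Dict (List Char) (List String)) w =>
          d.modify (suf w) [] (· ++ [w])) PySem.Dict.empty).items).foldl
      (fun (r : PySem.Dict (List String) (List String)) kv =>
        if (ws.foldl (fun (d : PySem.Dict (List Char) (List String)) w =>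
              d.modify (suf w).reverse [] (· ++ [w])) PySem.Dict.empty).contains kv.1 = false then r
        else if decide (kv.1.reverse < kv.1) then r
        else if kv.2.length == 1 && kv.2 ==
            (ws.foldl (fun (d : PySem.Dict (List Char) (List String)) w =>
              d.modify (suf w).reverse [] (· ++ [w])) PySem.Dict.empty).getD kv.1 [] then r
        else r.insert kv.2 ((ws.foldl (fun (d : PySem.Dict (List Char) (List String)) w =>
              d.modify (suf w).reverse [] (· ++ [w])) PySem.Dict.empty).getD kv.1 []))
      PySem.Dict.empty).items)
    = ((ws.foldl (fun (p : List (List Char) × PySem.Dict (List String) (List String)) w =>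
        if suf w ∈ p.1 then p
        else
          if (ws.filter (fun v => suf v == (suf w).reverse)).isEmpty then (p.1 ++ [suf w], p.2)
          else if decide ((suf w).reverse < suf w) then (p.1 ++ [suf w], p.2)
          else if (ws.filter (fun v => suf v == suf w)).length == 1
                  && (ws.filter (fun v => suf v == suf w)) == (ws.filter (fun v => suf v == (suf w).reverse)) then (p.1 ++ [suf w], p.2)
          else (p.1 ++ [suf w], p.2.insert (ws.filter (fun v => suf v == suf w))
                  (ws.filter (fun v => suf v == (suf w).reverse))))
        ([], PySem.Dict.empty)).2).items := by
  -- A side: items of the grouping dict = map over first-occurrence keys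
  rw [PySem.Dict.items_eq_map_keys _ (nodup_keys_group suf ws) ([] : List String),
    keys_group, List.foldl_map]
  -- B side: instantiate the dedup lemma and reshape the port's step into it
  have hd := dedup_fold (fun (r : PySem.Dict (List String) (List String)) (s : List Char) =>
      if (ws.filter (fun v => suf v == s.reverse)).isEmpty then r
      else if decide (s.reverse < s) then r
      else if (ws.filter (fun v => suf v == s)).length == 1
              && (ws.filter (fun v => suf v == s)) == (ws.filter (fun v => suf v == s.reverse)) then r
      else r.insert (ws.filter (fun v => suf v == s)) (ws.filter (fun v => suf v == s.reverse)))
    (ws.map suf) [] PySem.Dict.empty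
  rw [List.foldl_map] at hd
  have hstep : (fun (p : List (List Char) × PySem.Dict (List String) (List String)) w =>
        if suf w ∈ p.1 then p
        else
          if (ws.filter (fun v => suf v == (suf w).reverse)).isEmpty then (p.1 ++ [suf w], p.2)
          else if decide ((suf w).reverse < suf w) then (p.1 ++ [suf w], p.2)
          else if (ws.filter (fun v => suf v == suf w)).length == 1
                  && (ws.filter (fun v => suf v == suf w)) == (ws.filter (fun v => suf v == (suf w).reverse)) then (p.1 ++ [suf w], p.2)
          else (p.1 ++ [suf w], p.2.insert (ws.filter (fun v => suf v == suf w))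
                  (ws.filter (fun v => suf v == (suf w).reverse))))
      = (fun (p : List (List Char) × PySem.Dict (List String) (List String)) w =>
          if suf w ∈ p.1 then p
          else (p.1 ++ [suf w],
            if (ws.filter (fun v => suf v == (suf w).reverse)).isEmpty then p.2
            else if decide ((suf w).reverse < suf w) then p.2
            else if (ws.filter (fun v => suf v == suf w)).length == 1
                    && (ws.filter (fun v => suf v == suf w)) == (ws.filter (fun v => suf v == (suf w).reverse)) then p.2
            else p.2.insert (ws.filter (fun v => suf v == suf w))
                  (ws.filter (fun v => suf v == (suf w).reverse)))) := by
    funext p w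
    by_cases h : suf w ∈ p.1
    · simp only [h, if_pos]
    · simp only [h, if_neg, not_false_iff]
      split_ifs <;> rfl
  rw [hstep, hd]
  rw [show ((PySem.Set.ofList (ws.map suf)).filter fun s => decide (s ∉ ([] : List (List Char))))
      = PySem.Set.ofList (ws.map suf) by simp]
  congr 1
  apply PySem.List.foldl_congr_mem
  intro r s _
  rw [contains_group (fun w => (suf w).reverse) ws s,
    getD_group (fun w => (suf w).reverse) ws s, getD_group suf ws s, rev_filter]
  by_cases hmem : ∃ w ∈ ws, suf w = s.reverse
  · have h1 : decide (s ∈ ws.map fun w => (suf w).reverse) = true := by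
      obtain ⟨w, hw, he⟩ := hmem
      simp only [decide_eq_true_eq, List.mem_map]
      exact ⟨w, hw, by rw [he, List.reverse_reverse]⟩
    have h2 : (ws.filter (fun v => suf v == s.reverse)).isEmpty = false := by
      obtain ⟨w, hw, he⟩ := hmem
      simp only [List.isEmpty_eq_false_iff, ne_eq, List.filter_eq_nil_iff, not_forall]
      exact ⟨w, hw, by simp [he]⟩
    rw [h1, h2]
    simp only [Bool.true_eq_false, if_false, Bool.false_eq_true, if_false]
  · have h1 : decide (s ∈ ws.map fun w => (suf w).reverse) = false := by
      simp only [decide_eq_false_iff_not, List.mem_map, not_exists]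
      intro w hc
      exact hmem ⟨w, hc.1, by rw [← hc.2, List.reverse_reverse]⟩
    have h2 : (ws.filter (fun v => suf v == s.reverse)).isEmpty = true := by
      simp only [List.isEmpty_iff, List.filter_eq_nil_iff]
      intro w hw
      simp only [beq_iff_eq]
      exact fun he => hmem ⟨w, hw, he⟩
    rw [h1, h2]
    simp only [if_pos]

theorem main_eq : ∀ (words : List String) (n : Int), turn_tail words n = turn_tail_alt words n := by
  intro words n
  unfold turn_tail turn_tail_alt
  simp only [PySem.List.slice?_none_none_neg_one, Option.getD_some]
  have hsplit := PySem.List.foldl_prod_mk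
    (fun (d : PySem.Dict (List Char) (List String)) (w : String) =>
      d.modify (PySem.List.slice w.toList (some (-n)) none) [] (· ++ [w]))
    (fun (d : PySem.Dict (List Char) (List String)) (w : String) =>
      d.modify (PySem.List.slice w.toList (some (-n)) none).reverse [] (· ++ [w]))
    (words.filter (fun w => decide (n ≤ (PySem.Str.len w : Int)))) PySem.Dict.empty PySem.Dict.empty
  rw [hsplit]
  exact bridge (fun w => PySem.List.slice w.toList (some (-n)) none) _

-- ===== VERDICT (by name: the statement is the Claim_ definition above) =====
theorem turn_tail_spec : Claim_equal_turn_tail := by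
  intro words n _
  exact main_eq words n
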